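-- pv_equiv track=rewrite | github.com/vladofilipovic/SGI_Python | EserciziAggiuntivi/03-recnici/regioni.py | StatistikaUDrzavi4
-- ===== SOURCE A (Python) =====
-- def StatistikaUDrzavi4(gradovi):
--     risultato = {}
--     pomocna = {}
--     for drzava in gradovi.keys():
--         dizTeritorije = gradovi[drzava]
--         for teritorija in dizTeritorije.keys():
--             listaTupli = dizTeritorije[teritorija]
--             for i in range(len(listaTupli)):
--                 grad = listaTupli[i][0]
--                 populacija = listaTupli[i][1]
--                 valore = pomocna.get(drzava, [0,[],[]])
--                 valore[0] = valore[0] + populacija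
--                 valore[1] = valore[1] +[grad]
--                 if teritorija not in valore[2]:
--                     valore[2] = valore[2] + [teritorija]
--                 pomocna[drzava] = valore
--     for drzava in pomocna.keys():
--         ukupnaPopulacija = pomocna[drzava][0]
--         listaGradova = pomocna[drzava][1]
--         listaTeritorija = pomocna[drzava][2]
--         risultato[drzava] = (ukupnaPopulacija, len(listaGradova), len(listaTeritorija))
--     return risultato
-- ===== SOURCE B (Python) =====
-- def StatistikaUDrzavi4(gradovi):
--     risultato = {}
--     for drzava, teritorije in gradovi.items():
--         populacija = sum(p for terr in teritorije.values() for _, p in terr)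
--         brojGradova = sum(len(terr) for terr in teritorije.values())
--         brojTeritorija = sum(1 for terr in teritorije.values() if terr)
--         if brojGradova > 0:
--             risultato[drzava] = (populacija, brojGradova, brojTeritorija)
--     return risultato
-- ===== Notes on version B (the rewrite author's own statement) =====
-- stated objective: simpler
-- what changed: B replaces A's mutable per-country accumulator triple (running sum, growing city list, growing territory-name list rebuilt per tuple with a membership test) by three independent direct reductions per country (sum of populations, sum of territory lengths, count of non-empty territories), adding the country only when its city count is positive.
import Mathlib
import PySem

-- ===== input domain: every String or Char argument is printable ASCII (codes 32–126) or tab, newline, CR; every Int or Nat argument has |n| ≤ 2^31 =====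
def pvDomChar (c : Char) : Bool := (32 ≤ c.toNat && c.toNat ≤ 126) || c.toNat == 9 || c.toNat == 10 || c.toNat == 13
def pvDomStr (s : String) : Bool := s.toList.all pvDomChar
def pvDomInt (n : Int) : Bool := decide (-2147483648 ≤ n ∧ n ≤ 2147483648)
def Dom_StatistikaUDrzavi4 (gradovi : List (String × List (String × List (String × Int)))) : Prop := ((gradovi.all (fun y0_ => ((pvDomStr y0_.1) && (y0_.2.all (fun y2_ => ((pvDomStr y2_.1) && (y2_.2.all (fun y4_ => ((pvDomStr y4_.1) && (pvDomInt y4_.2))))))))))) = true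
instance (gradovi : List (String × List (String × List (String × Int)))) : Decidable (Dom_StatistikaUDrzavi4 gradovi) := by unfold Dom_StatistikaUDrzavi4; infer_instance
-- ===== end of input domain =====

-- B computes each country's (population sum, city count, non-empty-territory count) as three
-- independent direct reductions instead of A's per-tuple mutable accumulator triple: simpler.


-- ===== PORT A =====
-- The dict arguments arrive as association lists; both ports first rebuild the Python dicts
-- with PySem.Dict.ofList (duplicate keys overwrite, first position kept), exactly as dict() does.
def StatistikaUDrzavi4 (gradovi : List (String × List (String × List (String × Int)))) : List (String × Int × Int × Int) :=
  let g : PySem.Dict String (PySem.Dict String (List (String × Int))) :=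
    PySem.Dict.ofList (gradovi.map (fun p => (p.1, PySem.Dict.ofList p.2)))
  let pomocna : PySem.Dict String (Int × List String × List String) :=
    g.keys.foldl (fun pomocna drzava =>
      let dizTeritorije := g.getD drzava PySem.Dict.empty
      dizTeritorije.keys.foldl (fun pomocna teritorija =>
        let listaTupli := dizTeritorije.getD teritorija []
        (PySem.List.pyRange 0 (PySem.List.len listaTupli)).foldl (fun pomocna i =>
          let grad := (PySem.List.pyGetD listaTupli i ("", 0)).1
          let populacija := (PySem.List.pyGetD listaTupli i ("", 0)).2
          let valore := pomocna.getD drzava (0, ([], []))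
          let valore2 := if teritorija ∈ valore.2.2 then valore.2.2 else valore.2.2 ++ [teritorija]
          pomocna.insert drzava (valore.1 + populacija, valore.2.1 ++ [grad], valore2)) pomocna) pomocna) PySem.Dict.empty
  let risultato : PySem.Dict String (Int × Int × Int) :=
    pomocna.keys.foldl (fun risultato drzava =>
      let v := pomocna.getD drzava (0, ([], []))
      risultato.insert drzava (v.1, ((v.2.1.length : Int), (v.2.2.length : Int)))) PySem.Dict.empty
  risultato.items

-- ===== PORT B =====
def StatistikaUDrzavi4_alt (gradovi : List (String × List (String × List (String × Int)))) : List (String × Int × Int × Int) :=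
  let g : PySem.Dict String (PySem.Dict String (List (String × Int))) :=
    PySem.Dict.ofList (gradovi.map (fun p => (p.1, PySem.Dict.ofList p.2)))
  (g.items.foldl (fun risultato p =>
      let terrs := p.2.values
      let populacija := (terrs.map (fun terr => (terr.map (fun q => q.2)).sum)).sum
      let brojGradova := (terrs.map (fun terr => (PySem.List.len terr : Int))).sum
      let brojTeritorija := (terrs.filter (fun terr => !terr.isEmpty)).length
      if 0 < brojGradova then risultato.insert p.1 (populacija, (brojGradova, (brojTeritorija : Int)))
      else risultato) PySem.Dict.empty).items


-- ===== PRECONDITION & SPEC =====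
def Spec_StatistikaUDrzavi4 (gradovi : List (String × List (String × List (String × Int)))) (out : List (String × Int × Int × Int)) : Prop := out = StatistikaUDrzavi4_alt gradovi
instance (gradovi : List (String × List (String × List (String × Int)))) (out : List (String × Int × Int × Int)) : Decidable (Spec_StatistikaUDrzavi4 gradovi out) := by unfold Spec_StatistikaUDrzavi4; infer_instance

-- ===== CLAIM (what is proved, stated in full; the proofs are below) =====
def Claim_equal_StatistikaUDrzavi4 : Prop := ∀ (gradovi : List (String × List (String × List (String × Int)))), Dom_StatistikaUDrzavi4 gradovi → Spec_StatistikaUDrzavi4 gradovi (StatistikaUDrzavi4 gradovi)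

-- ===== LEMMAS AND PROOFS =====

def pvTStep (ter : String) (v : Int × List String × List String) (t : String × Int) : Int × List String × List String :=
  (v.1 + t.2, v.2.1 ++ [t.1], if ter ∈ v.2.2 then v.2.2 else v.2.2 ++ [ter])
def pvCFold (ts : List (String × List (String × Int))) (v : Int × List String × List String) : Int × List String × List String :=
  ts.foldl (fun v q => q.2.foldl (pvTStep q.1) v) v

theorem pvMemValuesUpdate {κ ν : Type} [BEq κ] [LawfulBEq κ] (l : List (κ × ν)) (d : PySem.Dict κ ν) (w : ν)
    (h : w ∈ (d.update l).values) : w ∈ d.values ∨ ∃ q ∈ l, w = q.2 := by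
  induction l generalizing d with
  | nil => simp only [PySem.Dict.update, List.foldl_nil] at h; exact Or.inl h
  | cons a l ih =>
    simp only [PySem.Dict.update, List.foldl_cons] at h
    rcases ih _ h with h' | ⟨q, hq, rfl⟩
    · rcases PySem.Dict.mem_values_insert _ _ _ _ h' with rfl | h''
      · exact Or.inr ⟨a, List.mem_cons_self, rfl⟩
      · exact Or.inl h''
    · exact Or.inr ⟨q, List.mem_cons_of_mem _ hq, rfl⟩

theorem pvTupleLoop (d ter : String) (l : List (String × Int))
    (P : PySem.Dict String (Int × List String × List String)) :
    l.foldl (fun P t => P.insert d (pvTStep ter (P.getD d (0, ([], []))) t)) P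
      = if l.isEmpty then P else P.insert d (l.foldl (pvTStep ter) (P.getD d (0, ([], [])))) := by
  induction l generalizing P with
  | nil => simp
  | cons t l ih =>
    simp only [List.foldl_cons, List.isEmpty_cons, if_false, Bool.false_eq_true]
    rw [ih]
    cases l with
    | nil => simp
    | cons t' l' =>
      simp only [List.isEmpty_cons, if_false, Bool.false_eq_true,
        PySem.Dict.getD_insert_self, PySem.Dict.insert_insert_self]

theorem pvCFold_all_empty (ts : List (String × List (String × Int))) (v : Int × List String × List String)
    (h : ts.all (fun q => q.2.isEmpty)) : pvCFold ts v = v := by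
  induction ts generalizing v with
  | nil => rfl
  | cons q ts ih =>
    simp only [List.all_cons, Bool.and_eq_true, List.isEmpty_iff] at h
    simp only [pvCFold, List.foldl_cons, h.1, List.foldl_nil]
    exact ih v (by simpa using h.2)

theorem pvCountryLoop (d : String) (ts : List (String × List (String × Int)))
    (P : PySem.Dict String (Int × List String × List String)) :
    ts.foldl (fun P q => if q.2.isEmpty then P else P.insert d (q.2.foldl (pvTStep q.1) (P.getD d (0, ([], []))))) P
      = if ts.all (fun q => q.2.isEmpty) then P else P.insert d (pvCFold ts (P.getD d (0, ([], [])))) := by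
  induction ts generalizing P with
  | nil => simp
  | cons q ts ih =>
    rcases Bool.eq_false_or_eq_true q.2.isEmpty with hq | hq
    · have he : q.2 = [] := List.isEmpty_iff.mp hq
      have hc : pvCFold (q :: ts) (P.getD d (0, ([], []))) = pvCFold ts (P.getD d (0, ([], []))) := by
        simp [pvCFold, he]
      simp only [List.foldl_cons, List.all_cons, hq, if_pos rfl, Bool.true_and, ih, hc]
      simp
    · simp only [List.foldl_cons, List.all_cons, hq, Bool.false_eq_true, if_false,
        Bool.false_and, ih]
      rcases Bool.eq_false_or_eq_true (ts.all (fun q => q.2.isEmpty)) with hall | hall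
      · have h1 := pvCFold_all_empty ts (q.2.foldl (pvTStep q.1) (P.getD d (0, ([], [])))) hall
        have hc : pvCFold (q :: ts) (P.getD d (0, ([], []))) = q.2.foldl (pvTStep q.1) (P.getD d (0, ([], []))) := by
          simp only [pvCFold, List.foldl_cons]
          exact h1
        simp only [hall, if_pos rfl, hc]
        simp
      · simp only [hall, Bool.false_eq_true, if_false, PySem.Dict.getD_insert_self,
          PySem.Dict.insert_insert_self]
        simp [pvCFold]
theorem pvTS_mem (ter : String) (l : List (String × Int)) (v : Int × List String × List String)
    (h : ter ∈ v.2.2) :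
    l.foldl (pvTStep ter) v = (v.1 + (l.map (fun t => t.2)).sum, v.2.1 ++ l.map (fun t => t.1), v.2.2) := by
  induction l generalizing v with
  | nil => simp
  | cons t l ih =>
    simp only [List.foldl_cons, pvTStep, if_pos h]
    rw [ih (v.1 + t.2, v.2.1 ++ [t.1], v.2.2) h]
    simp [add_assoc]

theorem pvTS_notmem (ter : String) (l : List (String × Int)) (v : Int × List String × List String)
    (h : ter ∉ v.2.2) (hl : l ≠ []) :
    l.foldl (pvTStep ter) v = (v.1 + (l.map (fun t => t.2)).sum, v.2.1 ++ l.map (fun t => t.1), v.2.2 ++ [ter]) := by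
  cases l with
  | nil => exact absurd rfl hl
  | cons t l =>
    simp only [List.foldl_cons, pvTStep, if_neg h]
    rw [pvTS_mem ter l _ (by simp)]
    simp [add_assoc]

theorem pvCFold_closed (ts : List (String × List (String × Int))) (v : Int × List String × List String)
    (hdisj : ∀ q ∈ ts, q.1 ∉ v.2.2) (hnd : (ts.map (fun q => q.1)).Nodup) :
    pvCFold ts v = (v.1 + (ts.map (fun q => (q.2.map (fun t => t.2)).sum)).sum,
                    v.2.1 ++ (ts.map (fun q => q.2.map (fun t => t.1))).flatten,
                    v.2.2 ++ ((ts.filter (fun q => !q.2.isEmpty)).map (fun q => q.1))) := by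
  induction ts generalizing v with
  | nil => simp [pvCFold]
  | cons q ts ih =>
    simp only [List.map_cons, List.nodup_cons] at hnd
    rcases Bool.eq_false_or_eq_true q.2.isEmpty with hq | hq
    · have he : q.2 = [] := List.isEmpty_iff.mp hq
      simp only [pvCFold, List.foldl_cons, he, List.foldl_nil] at ih ⊢
      rw [ih v (fun p hp => hdisj p (List.mem_cons_of_mem _ hp)) hnd.2]
      simp [he, List.filter_cons, hq]
    · have hne : q.2 ≠ [] := by
        intro h; rw [h] at hq; simp at hq
      have hstep := pvTS_notmem q.1 q.2 v (hdisj q List.mem_cons_self) hne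
      have hdisj' : ∀ p ∈ ts, p.1 ∉ (v.2.2 ++ [q.1]) := by
        intro p hp
        simp only [List.mem_append, List.mem_singleton, not_or]
        exact ⟨hdisj p (List.mem_cons_of_mem _ hp), by
          intro hh; exact hnd.1 (hh ▸ List.mem_map_of_mem hp)⟩
      simp only [pvCFold, List.foldl_cons] at ih ⊢
      rw [hstep, ih _ hdisj' hnd.2]
      simp [hq, add_assoc, List.filter_cons]
theorem pvFreshFold {β : Type} (c : (String × β) → Prop) [DecidablePred c]
    (tfun : (String × β) → (Int × List String × List String) → (Int × List String × List String)) :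
    ∀ (l : List (String × β)) (P : PySem.Dict String (Int × List String × List String)),
    (∀ p ∈ l, P.contains p.1 = false) → (l.map (fun p => p.1)).Nodup →
    (l.foldl (fun P p => if c p then P.insert p.1 (tfun p (P.getD p.1 (0, ([], [])))) else P) P).items
      = P.items ++ (l.filter (fun p => decide (c p))).map (fun p => (p.1, tfun p (0, ([], [])))) := by
  intro l
  induction l with
  | nil => intro P _ _; simp
  | cons p l ih =>
    intro P hc hnd
    simp only [List.map_cons, List.nodup_cons] at hnd
    have hp : P.contains p.1 = false := hc p List.mem_cons_self
    by_cases hcp : c p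
    · have hP' : (if c p then P.insert p.1 (tfun p (P.getD p.1 (0, ([], [])))) else P)
          = P.insert p.1 (tfun p (0, ([], []))) := by
        rw [if_pos hcp, PySem.Dict.getD_of_not_contains _ _ hp]
      simp only [List.foldl_cons, hP']
      rw [ih (P.insert p.1 (tfun p (0, ([], [])))) (fun q hq => by
          rw [PySem.Dict.contains_insert]
          have hne : (q.1 == p.1) = false := by
            simp only [beq_eq_false_iff_ne, ne_eq]
            intro hh; exact hnd.1 (hh ▸ List.mem_map_of_mem hq)
          rw [hne, hc q (List.mem_cons_of_mem _ hq)]; rfl) hnd.2]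
      rw [PySem.Dict.items_insert_of_not_contains (h := hp)]
      simp [List.filter_cons, hcp]
    · simp only [List.foldl_cons, if_neg hcp]
      rw [ih P (fun q hq => hc q (List.mem_cons_of_mem _ hq)) hnd.2]
      simp [List.filter_cons, hcp]


theorem pvFreshFoldPure {β ν : Type} (c : (String × β) → Prop) [DecidablePred c] (val : (String × β) → ν) :
    ∀ (l : List (String × β)) (P : PySem.Dict String ν),
    (∀ p ∈ l, P.contains p.1 = false) → (l.map (fun p => p.1)).Nodup →
    (l.foldl (fun P p => if c p then P.insert p.1 (val p) else P) P).items
      = P.items ++ (l.filter (fun p => decide (c p))).map (fun p => (p.1, val p)) := by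
  intro l
  induction l with
  | nil => intro P _ _; simp
  | cons p l ih =>
    intro P hc hnd
    simp only [List.map_cons, List.nodup_cons] at hnd
    have hp : P.contains p.1 = false := hc p List.mem_cons_self
    by_cases hcp : c p
    · simp only [List.foldl_cons, if_pos hcp]
      rw [ih (P.insert p.1 (val p)) (fun q hq => by
          rw [PySem.Dict.contains_insert]
          have hne : (q.1 == p.1) = false := by
            simp only [beq_eq_false_iff_ne, ne_eq]
            intro hh; exact hnd.1 (hh ▸ List.mem_map_of_mem hq)
          rw [hne, hc q (List.mem_cons_of_mem _ hq)]; rfl) hnd.2]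
      rw [PySem.Dict.items_insert_of_not_contains (h := hp)]
      simp [List.filter_cons, hcp]
    · simp only [List.foldl_cons, if_neg hcp]
      rw [ih P (fun q hq => hc q (List.mem_cons_of_mem _ hq)) hnd.2]
      simp [List.filter_cons, hcp]


theorem pvIfFlip {α : Type} (b : Bool) (x y : α) : (if b = true then x else y) = (if (!b) = true then y else x) := by
  cases b <;> simp

theorem pvFinal (Q : PySem.Dict String (Int × List String × List String)) (hnd : Q.keys.Nodup) :
    (Q.keys.foldl (fun ris dr =>
        ris.insert dr ((Q.getD dr (0, ([], []))).1,
          (((Q.getD dr (0, ([], []))).2.1.length : Int), ((Q.getD dr (0, ([], []))).2.2.length : Int)))) PySem.Dict.empty).items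
      = Q.items.map (fun p => (p.1, (p.2.1, ((p.2.2.1.length : Int), (p.2.2.2.length : Int))))) := by
  rw [show Q.keys = Q.items.map (fun p => p.1) from rfl, List.foldl_map]
  rw [PySem.List.foldl_congr_mem Q.items _
    (fun ris p => ris.insert p.1 (p.2.1, ((p.2.2.1.length : Int), (p.2.2.2.length : Int)))) PySem.Dict.empty
    (by
      intro acc p hp
      obtain ⟨k, v⟩ := p
      have h := PySem.Dict.getD_of_mem_items Q hp hnd (0, ([], []))
      rw [h])]
  rw [PySem.Dict.items_foldl_insert_fresh Q.items (fun p => p.1)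
    (fun p => (p.2.1, ((p.2.2.1.length : Int), (p.2.2.2.length : Int)))) PySem.Dict.empty
    (by intro a _; exact PySem.Dict.contains_empty a.1) hnd]
  rfl

theorem pvCondPoint (ts : List (String × List (String × Int))) :
    (!(ts.all fun q => q.2.isEmpty))
      = decide (0 < ((ts.map (fun q => q.2)).map (fun terr => (PySem.List.len terr : Int))).sum) := by
  have hsum : ((ts.map (fun q => q.2)).map (fun terr => (PySem.List.len terr : Int))).sum
      = (((ts.map (fun q => q.2.length)).sum : Nat) : Int) := by
    rw [Nat.cast_list_sum]
    simp [List.map_map, PySem.List.len, Function.comp_def]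
  rw [hsum]
  rw [Bool.eq_iff_iff]
  simp only [Bool.not_eq_eq_eq_not, Bool.not_true, List.all_eq_false, decide_eq_true_iff]
  constructor
  · rintro ⟨q, hq, hne⟩
    have : 0 < (ts.map (fun q => q.2.length)).sum := by
      by_contra h
      have h0 : (ts.map (fun q => q.2.length)).sum = 0 := by omega
      have := List.sum_eq_zero_iff.mp h0 q.2.length (List.mem_map_of_mem hq)
      simp only [List.isEmpty_iff_length_eq_zero] at hne
      exact hne (by simpa using this)
    exact_mod_cast this
  · intro h
    have h' : 0 < (ts.map (fun q => q.2.length)).sum := by exact_mod_cast h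
    by_contra hall
    push_neg at hall
    have : (ts.map (fun q => q.2.length)).sum = 0 := by
      rw [List.sum_eq_zero_iff]
      intro x hx
      rcases List.mem_map.mp hx with ⟨q, hq, rfl⟩
      have hie := hall q hq
      simp only [List.isEmpty_iff_length_eq_zero] at hie
      exact hie
    omega

theorem pvValEq (dz : PySem.Dict String (List (String × Int)))
    (hnd : (dz.items.map (fun q => q.1)).Nodup) :
    ((pvCFold dz.items (0, ([], []))).1,
     (((pvCFold dz.items (0, ([], []))).2.1.length : Int), ((pvCFold dz.items (0, ([], []))).2.2.length : Int)))
    = ((dz.values.map (fun terr => (terr.map (fun q => q.2)).sum)).sum,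
       ((dz.values.map (fun terr => (PySem.List.len terr : Int))).sum,
        ((dz.values.filter (fun terr => !terr.isEmpty)).length : Int))) := by
  rw [pvCFold_closed dz.items _ (by simp) hnd]
  have hv : dz.values = dz.items.map (fun q => q.2) := rfl
  refine Prod.ext ?_ (Prod.ext ?_ ?_)
  · simp [hv, List.map_map, Function.comp_def]
  · simp only [hv, List.nil_append, List.length_flatten, List.map_map, Function.comp_def,
      List.length_map, Nat.cast_list_sum, PySem.List.len]
  · simp only [hv, List.nil_append, List.filter_map, List.length_map, Function.comp_def]

theorem pvMainEq :
    ∀ (gradovi : List (String × List (String × List (String × Int)))),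
      StatistikaUDrzavi4 gradovi = StatistikaUDrzavi4_alt gradovi := by
  intro gradovi
  simp only [StatistikaUDrzavi4, StatistikaUDrzavi4_alt]
  set g := PySem.Dict.ofList (gradovi.map (fun p => (p.1, PySem.Dict.ofList p.2))) with hg
  have hgnd : g.keys.Nodup := PySem.Dict.nodup_keys_ofList _
  have hvnd : ∀ p ∈ g.items, (p.2.items.map (fun q => q.1)).Nodup := by
    intro p hp
    have hpv : p.2 ∈ (PySem.Dict.empty.update (gradovi.map (fun r => (r.1, PySem.Dict.ofList r.2)))).values :=
      List.mem_map_of_mem hp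
    rcases pvMemValuesUpdate (gradovi.map (fun r => (r.1, PySem.Dict.ofList r.2))) PySem.Dict.empty p.2 hpv with h | ⟨q, hqL, hpq⟩
    · exact absurd h List.not_mem_nil
    · rcases List.mem_map.mp hqL with ⟨x, _, rfl⟩
      rw [hpq]
      exact PySem.Dict.nodup_keys_ofList x.2
  rw [show g.keys = g.items.map (fun p => p.1) from rfl, List.foldl_map]
  rw [PySem.List.foldl_congr_mem g.items _
      (fun P p => if (!(p.2.items.all fun q => q.2.isEmpty)) = true
        then P.insert p.1 (pvCFold p.2.items (P.getD p.1 (0, ([], [])))) else P)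
      PySem.Dict.empty
      (by
        intro P p hp
        obtain ⟨k, dz⟩ := p
        have hget : g.getD k PySem.Dict.empty = dz := PySem.Dict.getD_of_mem_items g hp hgnd _
        simp only [hget]
        rw [show dz.keys = dz.items.map (fun q => q.1) from rfl, List.foldl_map]
        rw [PySem.List.foldl_congr_mem dz.items _
            (fun P' q => if q.2.isEmpty = true then P'
              else P'.insert k (q.2.foldl (pvTStep q.1) (P'.getD k (0, ([], []))))) P
            (by
              intro P' q hq
              obtain ⟨t, l⟩ := q
              have hget2 : dz.getD t [] = l := PySem.Dict.getD_of_mem_items dz hq (hvnd (k, dz) hp) _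
              simp only [hget2]
              exact (PySem.List.foldl_pyRange_pyGetD l ("", 0)
                (fun P'' t' => P''.insert k (pvTStep t (P''.getD k (0, ([], []))) t')) P' (le_refl 0)).trans
                (pvTupleLoop k t l P'))]
        rw [pvCountryLoop k dz.items P, pvIfFlip])]
  set pom := List.foldl (fun (P : PySem.Dict String (Int × List String × List String)) p =>
      if (!(p.2.items.all fun q => q.2.isEmpty)) = true
      then P.insert p.1 (pvCFold p.2.items (P.getD p.1 (0, ([], [])))) else P)
    PySem.Dict.empty g.items with hpom
  have hpomItems : pom.items
      = (g.items.filter (fun p => !(p.2.items.all fun q => q.2.isEmpty))).map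
          (fun p => (p.1, pvCFold p.2.items (0, ([], [])))) := by
    rw [hpom]
    rw [pvFreshFold (fun p => (!(p.2.items.all fun q => q.2.isEmpty)) = true)
        (fun p v => pvCFold p.2.items v) g.items PySem.Dict.empty
        (fun p _ => PySem.Dict.contains_empty p.1) hgnd]
    simp
    rfl
  have hkeys : pom.keys = (g.items.filter (fun p => !(p.2.items.all fun q => q.2.isEmpty))).map (fun p => p.1) := by
    show pom.items.map (fun p => p.1) = _
    rw [hpomItems, List.map_map]
    rfl
  have hknd : pom.keys.Nodup := by
    rw [hkeys]
    exact List.Nodup.sublist (List.Sublist.map _ List.filter_sublist) hgnd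
  rw [pvFinal pom hknd]
  rw [hpomItems, List.map_map]
  rw [pvFreshFoldPure (fun p => 0 < ((p.2.values.map (fun terr => (PySem.List.len terr : Int))).sum))
      (fun p => ((p.2.values.map (fun terr => (terr.map (fun q => q.2)).sum)).sum,
        ((p.2.values.map (fun terr => (PySem.List.len terr : Int))).sum,
         ((p.2.values.filter (fun terr => !terr.isEmpty)).length : Int))))
      g.items PySem.Dict.empty (fun p _ => PySem.Dict.contains_empty p.1) hgnd]
  rw [show (PySem.Dict.empty : PySem.Dict String (Int × Int × Int)).items = [] from rfl, List.nil_append]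
  rw [List.filter_congr (fun p hp => by
    show (!(p.2.items.all fun q => q.2.isEmpty)) = _
    rw [pvCondPoint p.2.items])]
  refine List.map_congr_left ?_
  intro p hp
  have hpmem : p ∈ g.items := (List.mem_filter.mp hp).1
  have := pvValEq p.2 (hvnd p hpmem)
  exact congrArg (fun z => (p.1, z)) this

-- ===== VERDICT (by name: the statement is the Claim_ definition above) =====
theorem StatistikaUDrzavi4_spec : Claim_equal_StatistikaUDrzavi4 := by
  intro gradovi _
  unfold Spec_StatistikaUDrzavi4
  exact pvMainEq gradovi
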